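-- pv_equiv track=rewrite | github.com/pberrt/long-read-block-assembly | blockassembly/common/utils.py | unitig_classification
-- ===== SOURCE A (Python) =====
-- def unitig_classification(u1, u2):
--     compact_unitigs={}
--     for u in u1:
--         if u in compact_unitigs:
--             compact_unitigs[u].add(1)
--         else:
--             compact_unitigs[u]=set([1])
--     for u in u2:
--         if u in compact_unitigs:
--             compact_unitigs[u].add(2)
--         else:
--             compact_unitigs[u]=set([2])
--
--     sorted_unitigs = {"common":[], "only1":[], "only2": []}
--     for u in compact_unitigs:
--         if compact_unitigs[u]==set([1,2]):
--             sorted_unitigs["common"].append(u)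
--         if compact_unitigs[u]==set([1]):
--             sorted_unitigs["only1"].append(u)
--         if compact_unitigs[u]==set([2]):
--             sorted_unitigs["only2"].append(u)
--     return sorted_unitigs
-- ===== SOURCE B (Python) =====
-- def unitig_classification(u1, u2):
--     s1 = set(u1)
--     s2 = set(u2)
--     o1 = list(dict.fromkeys(u1))
--     o2 = list(dict.fromkeys(u2))
--     return {"common": [u for u in o1 if u in s2],
--             "only1": [u for u in o1 if u not in s2],
--             "only2": [u for u in o2 if u not in s1]}
-- ===== Notes on version B (the rewrite author's own statement) =====
-- stated objective: idiomatic
-- what changed: Replaces the dict-of-tag-sets built by two insertion loops and a three-way classifying scan with two membership sets plus dict.fromkeys orders and three comprehensions that emit each output list directly.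
import Mathlib
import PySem

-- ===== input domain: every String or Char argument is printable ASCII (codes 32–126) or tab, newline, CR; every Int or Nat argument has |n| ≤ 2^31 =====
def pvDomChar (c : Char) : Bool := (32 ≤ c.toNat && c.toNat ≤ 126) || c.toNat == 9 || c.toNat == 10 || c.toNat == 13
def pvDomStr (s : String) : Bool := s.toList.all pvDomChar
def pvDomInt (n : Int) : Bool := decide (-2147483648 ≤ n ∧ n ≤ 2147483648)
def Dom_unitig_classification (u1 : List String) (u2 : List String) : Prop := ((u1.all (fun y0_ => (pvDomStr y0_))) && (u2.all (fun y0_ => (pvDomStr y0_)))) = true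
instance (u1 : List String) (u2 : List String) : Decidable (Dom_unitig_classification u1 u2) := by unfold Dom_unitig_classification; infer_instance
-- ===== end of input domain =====

-- B replaces A's dict-of-tag-sets (two insertion loops + a classifying scan) with two
-- membership sets, dict.fromkeys orders, and three direct filters (objective: idiomatic).

-- ===== PORT A =====
-- first loop body: if u in d: d[u].add(1) else: d[u] = set([1])
def pvStep1 (d : PySem.Dict String (PySem.Set Int)) (u : String) : PySem.Dict String (PySem.Set Int) :=
  match d.get? u with
  | some s => d.insert u (s.add 1)
  | none   => d.insert u (PySem.Set.ofList [1])

-- second loop body: if u in d: d[u].add(2) else: d[u] = set([2])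
def pvStep2 (d : PySem.Dict String (PySem.Set Int)) (u : String) : PySem.Dict String (PySem.Set Int) :=
  match d.get? u with
  | some s => d.insert u (s.add 2)
  | none   => d.insert u (PySem.Set.ofList [2])

-- third loop body: three independent ifs appending u to common/only1/only2
def pvClassify (acc : List String × List String × List String) (kv : String × PySem.Set Int) :
    List String × List String × List String :=
  let acc := if PySem.Set.equal kv.2 (PySem.Set.ofList [1, 2]) then (acc.1 ++ [kv.1], acc.2.1, acc.2.2) else acc
  let acc := if PySem.Set.equal kv.2 (PySem.Set.ofList [1]) then (acc.1, acc.2.1 ++ [kv.1], acc.2.2) else acc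
  if PySem.Set.equal kv.2 (PySem.Set.ofList [2]) then (acc.1, acc.2.1, acc.2.2 ++ [kv.1]) else acc

def unitig_classification (u1 : List String) (u2 : List String) : List (String × List String) :=
  let d := u1.foldl pvStep1 PySem.Dict.empty
  let d := u2.foldl pvStep2 d
  let r := d.items.foldl pvClassify ([], [], [])
  [("common", r.1), ("only1", r.2.1), ("only2", r.2.2)]

-- ===== PORT B =====
def unitig_classification_alt (u1 : List String) (u2 : List String) : List (String × List String) :=
  let s1 := PySem.Set.ofList u1
  let s2 := PySem.Set.ofList u2
  let o1 := PySem.List.dedup u1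
  let o2 := PySem.List.dedup u2
  [("common", o1.filter (fun u => PySem.Set.contains s2 u)),
   ("only1", o1.filter (fun u => !PySem.Set.contains s2 u)),
   ("only2", o2.filter (fun u => !PySem.Set.contains s1 u))]

-- ===== PRECONDITION & SPEC =====
def Spec_unitig_classification (u1 : List String) (u2 : List String) (out : List (String × List String)) : Prop := out = unitig_classification_alt u1 u2
instance (u1 : List String) (u2 : List String) (out : List (String × List String)) : Decidable (Spec_unitig_classification u1 u2 out) := by unfold Spec_unitig_classification; infer_instance

-- ===== CLAIM (what is proved, stated in full; the proofs are below) =====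
def Claim_equal_unitig_classification : Prop := ∀ (u1 : List String) (u2 : List String), Dom_unitig_classification u1 u2 → Spec_unitig_classification u1 u2 (unitig_classification u1 u2)

-- ===== LEMMAS AND PROOFS =====

-- After the first loop every seen unitig carries the tag set {1}, in first-occurrence order.
theorem pvItems_phase1 (u1 : List String) :
    (u1.foldl pvStep1 PySem.Dict.empty).items
      = (PySem.List.dedup u1).map (fun u => (u, ([1] : PySem.Set Int))) := by
  induction u1 using List.reverseRecOn with
  | nil => rfl
  | append_singleton ys x ih =>
    rw [List.foldl_append, List.foldl_cons, List.foldl_nil]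
    set d := ys.foldl pvStep1 PySem.Dict.empty with hd
    have hkeys : d.keys = PySem.List.dedup ys := by
      simp [PySem.Dict.keys, ih, Function.comp_def]
    have hnd : d.keys.Nodup := by
      rw [hkeys]; exact PySem.List.nodup_dedup ys
    by_cases hx : x ∈ ys
    · have hxd : x ∈ PySem.List.dedup ys := by
        rw [PySem.List.mem_dedup]; exact hx
      have hmem : (x, ([1] : PySem.Set Int)) ∈ d.items := by
        rw [ih]; exact List.mem_map_of_mem hxd
      have hget : d.get? x = some ([1] : PySem.Set Int) :=
        PySem.Dict.get?_of_mem_items d hmem hnd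
      have hcont : d.contains x = true := by
        rw [PySem.Dict.contains_iff_mem_keys, hkeys]; exact hxd
      have hadd : PySem.Set.add ([1] : PySem.Set Int) 1 = [1] := by decide
      have hded : PySem.List.dedup (ys ++ [x]) = PySem.List.dedup ys := by
        simp only [PySem.List.dedup_eq_ofList, PySem.Set.ofList_append_singleton]
        exact PySem.Set.add_of_mem (by rw [PySem.Set.mem_ofList]; exact hx)
      rw [pvStep1, hget]
      simp only [hadd]
      rw [PySem.Dict.items_insert_of_contains d _ hcont, ih, hded, List.map_map]
      refine List.map_congr_left ?_
      intro u _
      by_cases hux : u = x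
      · subst hux; simp
      · simp [Function.comp, hux]
    · have hget : d.get? x = none := by
        rw [PySem.Dict.get?_eq_none_iff_not_mem_keys, hkeys, PySem.List.mem_dedup]
        exact hx
      have hcont : d.contains x = false := by
        rw [← Bool.not_eq_true, PySem.Dict.contains_iff_mem_keys, hkeys, PySem.List.mem_dedup]
        exact hx
      have hded : PySem.List.dedup (ys ++ [x]) = PySem.List.dedup ys ++ [x] := by
        simp only [PySem.List.dedup_eq_ofList, PySem.Set.ofList_append_singleton]
        exact PySem.Set.add_of_not_mem (by rw [PySem.Set.mem_ofList]; exact hx)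
      rw [pvStep1, hget]
      rw [PySem.Dict.items_insert_of_not_contains d _ hcont, ih, hded, List.map_append]
      rfl

-- After the second loop: u1's unitigs keep order with tag {1,2} or {1}; fresh u2 unitigs follow with {2}.
theorem pvItems_phase2 (u1 u2 : List String) :
    (u2.foldl pvStep2 (u1.foldl pvStep1 PySem.Dict.empty)).items
      = (PySem.List.dedup u1).map (fun u => (u, if u2.contains u then ([1, 2] : PySem.Set Int) else [1]))
        ++ ((PySem.List.dedup u2).filter (fun u => !u1.contains u)).map (fun u => (u, ([2] : PySem.Set Int))) := by
  have hbm : ∀ (l : List String) (a : String), l.contains a = true ↔ a ∈ l := by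
    intro l a; simp [List.contains_eq_mem]
  induction u2 using List.reverseRecOn with
  | nil => simp [pvItems_phase1]
  | append_singleton ys x ih =>
    rw [List.foldl_append, List.foldl_cons, List.foldl_nil]
    set d := ys.foldl pvStep2 (u1.foldl pvStep1 PySem.Dict.empty) with hd
    have hkeys : d.keys
        = PySem.List.dedup u1 ++ (PySem.List.dedup ys).filter (fun u => !u1.contains u) := by
      simp [PySem.Dict.keys, ih, Function.comp_def]
    have hnd : d.keys.Nodup := by
      rw [hkeys]
      refine List.Nodup.append (PySem.List.nodup_dedup u1)
        (List.Nodup.filter _ (PySem.List.nodup_dedup ys)) ?_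
      intro a ha hb
      have ha1 : a ∈ u1 := (PySem.List.mem_dedup u1 a).1 ha
      have hfa := List.of_mem_filter hb
      simp only [Bool.not_eq_true'] at hfa
      have hc := (hbm u1 a).2 ha1
      rw [hfa] at hc
      cases hc
    by_cases hx1 : x ∈ u1
    · -- x already tagged from u1: its set gains 2 (or already has it)
      have hxd : x ∈ PySem.List.dedup u1 := (PySem.List.mem_dedup u1 x).2 hx1
      have hmem : (x, if ys.contains x then ([1, 2] : PySem.Set Int) else [1]) ∈ d.items := by
        rw [ih]; exact List.mem_append_left _ (List.mem_map_of_mem hxd)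
      have hget : d.get? x = some (if ys.contains x then ([1, 2] : PySem.Set Int) else [1]) :=
        PySem.Dict.get?_of_mem_items d hmem hnd
      have hcont : d.contains x = true := by
        rw [PySem.Dict.contains_iff_mem_keys, hkeys]
        exact List.mem_append_left _ hxd
      have hadd : PySem.Set.add (if ys.contains x then ([1, 2] : PySem.Set Int) else [1]) 2
          = [1, 2] := by
        cases hb : ys.contains x
        · rw [if_neg (by simp)]; decide
        · rw [if_pos (by simp)]; decide
      have hfilt : (PySem.List.dedup (ys ++ [x])).filter (fun u => !u1.contains u)
          = (PySem.List.dedup ys).filter (fun u => !u1.contains u) := by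
        by_cases hxy : x ∈ ys
        · rw [show PySem.List.dedup (ys ++ [x]) = PySem.List.dedup ys by
            simp only [PySem.List.dedup_eq_ofList, PySem.Set.ofList_append_singleton]
            exact PySem.Set.add_of_mem ((PySem.Set.mem_ofList ys x).2 hxy)]
        · rw [show PySem.List.dedup (ys ++ [x]) = PySem.List.dedup ys ++ [x] by
            simp only [PySem.List.dedup_eq_ofList, PySem.Set.ofList_append_singleton]
            exact PySem.Set.add_of_not_mem (fun h => hxy ((PySem.Set.mem_ofList ys x).1 h))]
          rw [List.filter_append]
          simp [List.contains_eq_mem, hx1]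
      rw [pvStep2, hget, PySem.Dict.items_insert_of_contains d _ hcont, ih, hadd,
        List.map_append, hfilt]
      congr 1
      · rw [List.map_map]
        refine List.map_congr_left ?_
        intro u hu
        by_cases hux : u = x
        · subst hux
          simp [List.contains_eq_mem, List.mem_append]
        · have : (ys ++ [x]).contains u = ys.contains u := by
            simp [List.contains_eq_mem, List.mem_append, hux]
          simp [hux]
      · rw [List.map_map]
        refine List.map_congr_left ?_
        intro u hu
        have hnu1 : ¬ u ∈ u1 := by
          have hfa := List.of_mem_filter hu
          simp only [Bool.not_eq_true'] at hfa
          intro h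
          have hc := (hbm u1 u).2 h
          rw [hfa] at hc
          cases hc
        have hux : ¬ u = x := fun h => hnu1 (h ▸ hx1)
        simp [hux]
    · by_cases hxy : x ∈ ys
      · -- fresh-from-u2 unitig seen again: {2}.add 2 = {2}
        have hxd : x ∈ (PySem.List.dedup ys).filter (fun u => !u1.contains u) := by
          refine List.mem_filter.2 ⟨(PySem.List.mem_dedup ys x).2 hxy, ?_⟩
          simp only [Bool.not_eq_true']
          cases hc : u1.contains x
          · rfl
          · exact absurd ((hbm u1 x).1 hc) hx1
        have hmem : (x, ([2] : PySem.Set Int)) ∈ d.items := by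
          rw [ih]; exact List.mem_append_right _ (List.mem_map_of_mem hxd)
        have hget : d.get? x = some ([2] : PySem.Set Int) :=
          PySem.Dict.get?_of_mem_items d hmem hnd
        have hcont : d.contains x = true := by
          rw [PySem.Dict.contains_iff_mem_keys, hkeys]
          exact List.mem_append_right _ hxd
        have hded : PySem.List.dedup (ys ++ [x]) = PySem.List.dedup ys := by
          simp only [PySem.List.dedup_eq_ofList, PySem.Set.ofList_append_singleton]
          exact PySem.Set.add_of_mem ((PySem.Set.mem_ofList ys x).2 hxy)
        have hadd : PySem.Set.add ([2] : PySem.Set Int) 2 = [2] := by decide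
        rw [pvStep2, hget, PySem.Dict.items_insert_of_contains d _ hcont, ih, hadd,
          List.map_append, hded]
        congr 1
        · rw [List.map_map]
          refine List.map_congr_left ?_
          intro u hu
          have hu1 : u ∈ u1 := (PySem.List.mem_dedup u1 u).1 hu
          have hux : ¬ u = x := fun h => hx1 (h ▸ hu1)
          have : (ys ++ [x]).contains u = ys.contains u := by
            simp [List.contains_eq_mem, List.mem_append, hux]
          simp [hux]
        · rw [List.map_map]
          refine List.map_congr_left ?_
          intro u hu
          by_cases hux : u = x <;> simp [hux]
      · -- brand-new unitig: appended with {2}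
        have hxk : ¬ x ∈ d.keys := by
          rw [hkeys, List.mem_append]
          rintro (h | h)
          · exact hx1 ((PySem.List.mem_dedup u1 x).1 h)
          · exact hxy ((PySem.List.mem_dedup ys x).1 (List.mem_of_mem_filter h))
        have hget : d.get? x = none := by
          rw [PySem.Dict.get?_eq_none_iff_not_mem_keys]; exact hxk
        have hcont : d.contains x = false := by
          rw [← Bool.not_eq_true, PySem.Dict.contains_iff_mem_keys]; exact hxk
        have hded : PySem.List.dedup (ys ++ [x]) = PySem.List.dedup ys ++ [x] := by
          simp only [PySem.List.dedup_eq_ofList, PySem.Set.ofList_append_singleton]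
          exact PySem.Set.add_of_not_mem (fun h => hxy ((PySem.Set.mem_ofList ys x).1 h))
        rw [pvStep2, hget, PySem.Dict.items_insert_of_not_contains d _ hcont, ih, hded,
          List.filter_append]
        have hpx : (fun u => !u1.contains u) x = true := by
          simp only [Bool.not_eq_true']
          cases hb : u1.contains x
          · rfl
          · exact absurd ((hbm u1 x).1 hb) hx1
        have hM1 : ∀ u ∈ PySem.List.dedup u1,
            ((ys ++ [x]).contains u : Bool) = ys.contains u := by
          intro u hu
          have hu1 : u ∈ u1 := (PySem.List.mem_dedup u1 u).1 hu
          have hux : ¬ u = x := fun h => hx1 (h ▸ hu1)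
          simp [List.contains_eq_mem, List.mem_append, hux]
        rw [List.append_assoc]
        congr 1
        · refine List.map_congr_left ?_
          intro u hu
          rw [hM1 u hu]
        · have hpx' : (!u1.contains x) = true := hpx
          rw [@List.filter_cons_of_pos String (fun u => !u1.contains u) x [] hpx,
            List.filter_nil, List.map_append]
          rfl

theorem pvClassify_lists (l : List String) (b : String → Bool) (c o1 o2 : List String) :
    (l.map (fun u => (u, if b u then ([1, 2] : PySem.Set Int) else [1]))).foldl pvClassify (c, o1, o2)
      = (c ++ l.filter b, o1 ++ l.filter (fun u => !b u), o2) := by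
  induction l generalizing c o1 with
  | nil => simp
  | cons x t ih =>
    cases hb : b x <;> simp [pvClassify, hb, ih]

theorem pvClassify_two (l : List String) (c o1 o2 : List String) :
    (l.map (fun u => (u, ([2] : PySem.Set Int)))).foldl pvClassify (c, o1, o2)
      = (c, o1, o2 ++ l) := by
  induction l generalizing o2 with
  | nil => simp
  | cons x t ih => simp [pvClassify, ih]

-- ===== VERDICT (by name: the statement is the Claim_ definition above) =====
theorem unitig_classification_spec : Claim_equal_unitig_classification := by
  intro u1 u2 _
  show _ = _
  unfold unitig_classification unitig_classification_alt
  simp only [pvItems_phase2, List.foldl_append,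
    pvClassify_lists, pvClassify_two, List.nil_append]
  have hc2 : u2.contains = (fun u => decide (u ∈ u2)) := funext fun u => List.contains_eq_mem u u2
  simp [hc2]
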